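-- pv_equiv track=rewrite | github.com/Redbaron13/TheLobby-App | backend/gis/validation.py | find_optional_field
-- ===== SOURCE A (Python) =====
-- from typing import Any
--
-- def find_optional_field(fields: list[dict[str, Any]], candidates: set[str]) -> str | None:
--     for field in fields:
--         name = field.get("name")
--         if name and name.upper() in candidates:
--             return name
--     for field in fields:
--         name = field.get("name")
--         if name and any(candidate in name.upper() for candidate in candidates):
--             return name
--     return None
-- ===== SOURCE B (Python) =====
-- from typing import Any
--
-- def find_optional_field(fields: list[dict[str, Any]], candidates: set[str]) -> str | None:
--     fallback = None
--     for field in fields: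
--         name = field.get("name")
--         if not name:
--             continue
--         upper = name.upper()
--         if upper in candidates:
--             return name
--         if fallback is None and any(c in upper for c in candidates):
--             fallback = name
--     return fallback
-- ===== Notes on version B (the rewrite author's own statement) =====
-- stated objective: simpler
-- what changed: Replaced A's two full scans (one for exact matches, one for substring matches) by a single pass that returns immediately on an exact match and keeps the first substring hit as a fallback.
import Mathlib
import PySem

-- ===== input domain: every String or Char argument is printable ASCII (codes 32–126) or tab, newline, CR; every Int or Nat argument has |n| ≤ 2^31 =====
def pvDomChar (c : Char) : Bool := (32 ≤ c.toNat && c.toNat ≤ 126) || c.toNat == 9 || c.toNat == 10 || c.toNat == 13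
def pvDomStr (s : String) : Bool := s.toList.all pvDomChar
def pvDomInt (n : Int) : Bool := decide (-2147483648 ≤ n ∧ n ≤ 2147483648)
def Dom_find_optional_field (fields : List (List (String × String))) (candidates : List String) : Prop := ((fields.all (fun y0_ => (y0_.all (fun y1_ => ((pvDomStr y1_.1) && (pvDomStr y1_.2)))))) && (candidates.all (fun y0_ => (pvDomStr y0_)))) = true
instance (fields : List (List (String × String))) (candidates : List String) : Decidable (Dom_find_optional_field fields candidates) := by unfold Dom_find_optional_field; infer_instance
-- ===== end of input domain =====

-- ===== PORT A =====
-- B is a single pass with a fallback instead of A's two full scans; same return value everywhere.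
-- A's first loop: return the first field name whose .upper() is exactly in candidates.
def fofExact (candidates : List String) : List (List (String × String)) → Option String
  | [] => none
  | field :: rest =>
    match PySem.Dict.get? (PySem.Dict.mk field) "name" with
    | some name =>
      if name ≠ "" ∧ PySem.Set.contains candidates (PySem.Str.upper name) = true then some name
      else fofExact candidates rest
    | none => fofExact candidates rest

-- A's second loop: return the first field name whose .upper() contains some candidate as a substring.
def fofSub (candidates : List String) : List (List (String × String)) → Option String
  | [] => none
  | field :: rest =>
    match PySem.Dict.get? (PySem.Dict.mk field) "name" with
    | some name =>
      if name ≠ "" ∧ candidates.any (fun c => PySem.Str.isIn c (PySem.Str.upper name)) = true then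
        some name
      else fofSub candidates rest
    | none => fofSub candidates rest

def find_optional_field (fields : List (List (String × String))) (candidates : List String) : Option String :=
  match fofExact candidates fields with
  | some n => some n
  | none =>
    match fofSub candidates fields with
    | some n => some n
    | none => none

-- ===== PORT B =====
-- B's single loop: return immediately on an exact match, remember the first substring hit as fallback.
def fofLoop (candidates : List String) (fallback : Option String) : List (List (String × String)) → Option String
  | [] => fallback
  | field :: rest =>
    match PySem.Dict.get? (PySem.Dict.mk field) "name" with
    | none => fofLoop candidates fallback rest
    | some name =>
      if name = "" then fofLoop candidates fallback rest
      else
        let upper := PySem.Str.upper name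
        if PySem.Set.contains candidates upper then some name
        else if fallback = none ∧ candidates.any (fun c => PySem.Str.isIn c upper) = true then
          fofLoop candidates (some name) rest
        else fofLoop candidates fallback rest

def find_optional_field_alt (fields : List (List (String × String))) (candidates : List String) : Option String :=
  fofLoop candidates none fields

-- ===== PRECONDITION & SPEC =====
def Spec_find_optional_field (fields : List (List (String × String))) (candidates : List String) (out : Option String) : Prop := out = find_optional_field_alt fields candidates
instance (fields : List (List (String × String))) (candidates : List String) (out : Option String) : Decidable (Spec_find_optional_field fields candidates out) := by unfold Spec_find_optional_field; infer_instance

-- ===== CLAIM (what is proved, stated in full; the proofs are below) =====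
def Claim_equal_find_optional_field : Prop := ∀ (fields : List (List (String × String))) (candidates : List String), Dom_find_optional_field fields candidates → Spec_find_optional_field fields candidates (find_optional_field fields candidates)

-- ===== LEMMAS AND PROOFS =====

-- Loop invariant: the single pass with fallback fb equals "first exact, else fb, else first substring".
theorem fofLoop_eq (candidates : List String) (fb : Option String)
    (fields : List (List (String × String))) :
    fofLoop candidates fb fields =
      match fofExact candidates fields with
      | some n => some n
      | none =>
        match fb with
        | some f => some f
        | none => fofSub candidates fields := by
  induction fields generalizing fb with
  | nil => cases fb <;> simp [fofLoop, fofExact, fofSub]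
  | cons field rest ih =>
    simp only [fofLoop, fofExact, fofSub]
    cases hget : PySem.Dict.get? (PySem.Dict.mk field) "name" with
    | none => exact ih fb
    | some name =>
      by_cases hne : name = ""
      · subst hne; simp [ih fb]
      · by_cases hex : PySem.Str.upper name ∈ candidates
        · simp [hne, hex]
        · by_cases hsub : ∃ x ∈ candidates, PySem.Chars.isIn x.toList (PySem.Chars.upper name.toList) = true
          · cases fb with
            | none => simp [hne, hex, hsub, ih (some name)]
            | some f => simp [hne, hex, hsub, ih (some f)]
          · simp [hne, hex, hsub, ih fb]

-- ===== VERDICT (by name: the statement is the Claim_ definition above) =====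
theorem find_optional_field_spec : Claim_equal_find_optional_field := by
  intro fields candidates _
  unfold Spec_find_optional_field find_optional_field find_optional_field_alt
  rw [fofLoop_eq]
  cases fofExact candidates fields <;> cases fofSub candidates fields <;> simp
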